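-- pv_equiv track=rewrite | github.com/giulio-pasqualetti/exercises | alphabetic_anagrams.py | get_letters_and_multiplicity
-- ===== SOURCE A (Python) =====
-- def get_letters_and_multiplicity(word, letters=None, multiplicity=None):
--     if letters == None:
--         letters = list(set(list(word)))
--         letters.sort()
--         multiplicity = [0]*len(letters)
--     if word == '':
--         return letters, multiplicity
--     for index in range(len(letters)):
--         if word[0] == letters[index]:
--             multiplicity[index] += 1
--             return get_letters_and_multiplicity(word[1:], letters, multiplicity)
-- ===== SOURCE B (Python) =====
-- def get_letters_and_multiplicity(word, letters=None, multiplicity=None):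
--     if letters == None:
--         letters = sorted(set(word))
--         multiplicity = [0] * len(letters)
--     pos = {}
--     for i, l in enumerate(letters):
--         pos.setdefault(l, i)
--     for ch in word:
--         multiplicity[pos[ch]] += 1
--     return letters, multiplicity
-- ===== Notes on version B (the rewrite author's own statement) =====
-- stated objective: alternative
-- what changed: Replaces A's tail recursion (word[1:] slicing plus a linear rescan of letters for every character) by building a first-index position dictionary once and then a single iterative loop over word that increments multiplicity via one dict lookup per character.
-- outside the precondition, e.g. on get_letters_and_multiplicity('ab', ['a'], [0]): A returns None, B raises KeyError; on get_letters_and_multiplicity('a', ['a'], []): A raises IndexError, B raises IndexError; on get_letters_and_multiplicity('', ['a'], None): A returns (['a'], None), B returns (['a'], None)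
import Mathlib
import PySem

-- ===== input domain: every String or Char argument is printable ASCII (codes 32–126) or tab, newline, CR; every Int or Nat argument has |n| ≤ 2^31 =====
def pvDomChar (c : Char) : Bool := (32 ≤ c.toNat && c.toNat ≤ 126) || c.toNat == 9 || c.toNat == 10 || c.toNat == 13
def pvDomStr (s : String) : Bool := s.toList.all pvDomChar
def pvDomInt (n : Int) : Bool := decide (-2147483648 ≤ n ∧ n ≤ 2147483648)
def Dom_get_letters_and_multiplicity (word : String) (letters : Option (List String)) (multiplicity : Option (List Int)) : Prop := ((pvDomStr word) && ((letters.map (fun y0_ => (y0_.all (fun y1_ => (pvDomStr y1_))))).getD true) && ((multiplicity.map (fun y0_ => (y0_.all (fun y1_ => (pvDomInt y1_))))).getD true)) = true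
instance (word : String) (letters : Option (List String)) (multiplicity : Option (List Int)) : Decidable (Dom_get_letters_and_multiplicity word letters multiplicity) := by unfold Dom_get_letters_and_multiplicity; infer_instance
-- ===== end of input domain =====

-- B replaces A's tail recursion (word[1:] slicing + a linear scan of letters per character) by a
-- first-index position dictionary built once and one iterative pass over word; A mutates a supplied
-- multiplicity list in place (B does too) — the equivalence proved here is about the return value.

-- ===== PORT A =====
-- A's inner 'for index in range(len(letters)):' scan: first index i with word[0] == letters[i]; none = the loop falls through (Python then returns None; such inputs are outside Pre_)
def pvScanA (c : Char) : List String → Nat → Option Nat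
  | [], _ => none
  | s :: rest, i => if String.singleton c = s then some i else pvScanA c rest (i + 1)

-- A's tail recursion over the characters of word; 'multiplicity[index] += 1' raises IndexError when index ≥ len(multiplicity) (outside Pre_; the port's set/getD are no-ops there)
def pvGoA (L : List String) : List Char → List Int → List String × List Int
  | [], M => (L, M)
  | c :: rest, M =>
    match pvScanA c L 0 with
    | some i => pvGoA L rest (M.set i (M.getD i 0 + 1))
    | none => (L, M)   -- Python returns None here; outside Pre_

def get_letters_and_multiplicity (word : String) (letters : Option (List String)) (multiplicity : Option (List Int)) : List String × List Int :=
  match letters with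
  | none =>
    -- letters = list(set(list(word))); letters.sort(); multiplicity = [0]*len(letters)
    let L := PySem.List.sorted (PySem.Set.ofList (word.toList.map (fun c => String.singleton c))) (fun x => x) false
    pvGoA L word.toList (List.replicate L.length 0)
  | some L =>
    -- multiplicity = None here makes Python return (L, None) (empty word) or raise; outside Pre_
    pvGoA L word.toList (multiplicity.getD [])

-- ===== PORT B =====
-- pos = {}; for i, l in enumerate(letters): pos.setdefault(l, i)
def pvPos (L : List String) : PySem.Dict String Int :=
  (PySem.List.enumerate L 0).foldl (fun d p => d.setdefault p.2 p.1) PySem.Dict.empty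

-- multiplicity[pos[ch]] += 1  (pos values are enumerate indices, hence ≥ 0, so .toNat is exact; a missing key is Python's KeyError, outside Pre_)
def pvStepB (pos : PySem.Dict String Int) (M : List Int) (c : Char) : List Int :=
  match pos.get? (String.singleton c) with
  | some i => M.set i.toNat (M.getD i.toNat 0 + 1)
  | none => M

def get_letters_and_multiplicity_alt (word : String) (letters : Option (List String)) (multiplicity : Option (List Int)) : List String × List Int :=
  let LM : List String × List Int :=
    match letters with
    | none =>
      -- letters = sorted(set(word)); multiplicity = [0]*len(letters)
      let L := PySem.List.sorted (PySem.Set.ofList (word.toList.map (fun c => String.singleton c))) (fun x => x) false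
      (L, List.replicate L.length 0)
    | some L => (L, multiplicity.getD [])
  let pos := pvPos LM.1
  (LM.1, word.toList.foldl (pvStepB pos) LM.2)

-- ===== PRECONDITION & SPEC =====
-- Pre_ excludes exactly the inputs where Python A raises or returns no pair of the declared type:
-- a supplied letters with multiplicity = None (A returns (letters, None) or raises TypeError), a character
-- of word missing from the supplied letters (A returns None), and a matched first index ≥ len(multiplicity)
-- (A raises IndexError).  With letters = None A always returns normally.
def Pre_get_letters_and_multiplicity (word : String) (letters : Option (List String)) (multiplicity : Option (List Int)) : Prop :=
  (match letters, multiplicity with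
   | none, _ => true
   | some _, none => false
   | some L, some M =>
     word.toList.all (fun c =>
       match PySem.List.index? L (String.singleton c) with
       | some i => decide (i < M.length)
       | none => false)) = true
instance (word : String) (letters : Option (List String)) (multiplicity : Option (List Int)) : Decidable (Pre_get_letters_and_multiplicity word letters multiplicity) := by unfold Pre_get_letters_and_multiplicity; infer_instance

def pvWitness_get_letters_and_multiplicity : String × Option (List String) × Option (List Int) := ("banana", some ["a", "b", "n"], some [0, 0, 0])

def Spec_get_letters_and_multiplicity (word : String) (letters : Option (List String)) (multiplicity : Option (List Int)) (out : List String × List Int) : Prop := out = get_letters_and_multiplicity_alt word letters multiplicity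
instance (word : String) (letters : Option (List String)) (multiplicity : Option (List Int)) (out : List String × List Int) : Decidable (Spec_get_letters_and_multiplicity word letters multiplicity out) := by unfold Spec_get_letters_and_multiplicity; infer_instance

-- ===== CLAIM (what is proved, stated in full; the proofs are below) =====
def Claim_equal_get_letters_and_multiplicity : Prop := ∀ (word : String) (letters : Option (List String)) (multiplicity : Option (List Int)), Dom_get_letters_and_multiplicity word letters multiplicity → Pre_get_letters_and_multiplicity word letters multiplicity → Spec_get_letters_and_multiplicity word letters multiplicity (get_letters_and_multiplicity word letters multiplicity)

-- ===== LEMMAS AND PROOFS =====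

-- A's manual scan is list.index with an offset
lemma pvScanA_eq (c : Char) : ∀ (L : List String) (n : Nat),
    pvScanA c L n = (PySem.List.index? L (String.singleton c)).map (· + n) := by
  intro L
  induction L with
  | nil => intro n; simp [pvScanA, PySem.List.index?_eq_idxOf?]
  | cons s rest ih =>
    intro n
    by_cases h : String.singleton c = s
    · subst h
      rw [PySem.List.index?_cons_self]
      simp [pvScanA]
    · rw [PySem.List.index?_cons_of_ne rest (show s ≠ String.singleton c from fun hs => h hs.symm)]
      simp only [pvScanA, if_neg h, ih (n + 1), Option.map_map]
      cases PySem.List.index? rest (String.singleton c)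
      · simp
      · simp; omega

-- the setdefault fold keeps the FIRST index of every key
lemma pvPos_fold_get (x : String) : ∀ (L : List String) (s : Int) (d : PySem.Dict String Int),
    ((PySem.List.enumerate L s).foldl (fun d p => d.setdefault p.2 p.1) d).get? x
      = if d.contains x then d.get? x
        else (PySem.List.index? L x).map (fun k => (k : Int) + s) := by
  intro L
  induction L with
  | nil =>
    intro s d
    by_cases hc : d.contains x
    · simp [PySem.List.enumerate_nil, hc]
    · have hn : d.get? x = none := by
        have h2 := PySem.Dict.contains_eq_isSome_get? d x
        cases hg : d.get? x with
        | none => rfl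
        | some v => rw [hg] at h2; simp at h2; exact absurd h2 hc
      simp [PySem.List.enumerate_nil, hc, hn, PySem.List.index?_eq_idxOf?]
  | cons y t ih =>
    intro s d
    rw [PySem.List.enumerate_cons]
    simp only [List.foldl_cons]
    rw [ih (s + 1) (d.setdefault y s)]
    by_cases hc : d.contains x
    · have h1 : (d.setdefault y s).contains x = true := by
        by_cases hyc : d.contains y
        · rwa [PySem.Dict.setdefault_of_contains d s hyc]
        · rw [PySem.Dict.setdefault_of_not_contains d s (by simpa using hyc),
              PySem.Dict.contains_insert]
          simp [hc]
      rw [if_pos h1, if_pos hc]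
      by_cases hxy : x = y
      · subst hxy
        by_cases hyc : d.contains x
        · rw [PySem.Dict.setdefault_of_contains d s hyc]
        · exact absurd hc hyc
      · by_cases hyc : d.contains y
        · rw [PySem.Dict.setdefault_of_contains d s hyc]
        · rw [PySem.Dict.setdefault_of_not_contains d s (by simpa using hyc),
              PySem.Dict.get?_insert_of_ne d s hxy]
    · by_cases hxy : x = y
      · subst hxy
        have hd : d.setdefault x s = d.insert x s :=
          PySem.Dict.setdefault_of_not_contains d s (by simpa using hc)
        rw [hd, if_pos (PySem.Dict.contains_insert_self d x s),
            PySem.Dict.get?_insert_self, PySem.List.index?_cons_self]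
        simp [hc]
      · have h1 : (d.setdefault y s).contains x = false := by
          by_cases hyc : d.contains y
          · rw [PySem.Dict.setdefault_of_contains d s hyc]
            simpa using hc
          · rw [PySem.Dict.setdefault_of_not_contains d s (by simpa using hyc),
                PySem.Dict.contains_insert]
            simp [hxy]
            simpa using hc
        rw [if_neg (by simp [h1]), if_neg (by simpa using hc),
            PySem.List.index?_cons_of_ne t (show y ≠ x from fun hs => hxy hs.symm)]
        cases PySem.List.index? t x <;> simp
        omega

lemma pvPos_get (L : List String) (x : String) :
    (pvPos L).get? x = (PySem.List.index? L x).map (fun k => (k : Int)) := by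
  rw [pvPos, pvPos_fold_get x L 0 PySem.Dict.empty]
  simp [PySem.Dict.contains_empty]

-- A's recursion equals B's fold whenever every character of the word occurs in letters
lemma pvGoA_eq_fold : ∀ (chars : List Char) (L : List String) (M : List Int),
    (∀ c ∈ chars, String.singleton c ∈ L) →
    pvGoA L chars M = (L, chars.foldl (pvStepB (pvPos L)) M) := by
  intro chars
  induction chars with
  | nil => intro L M _; simp [pvGoA]
  | cons c rest ih =>
    intro L M hmem
    obtain ⟨k, hk⟩ : ∃ k, PySem.List.index? L (String.singleton c) = some k := by
      have := (PySem.List.index?_isSome_iff L (String.singleton c)).2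
        (hmem c (List.mem_cons_self))
      exact Option.isSome_iff_exists.mp this
    have hscan : pvScanA c L 0 = some k := by
      rw [pvScanA_eq c L 0, hk]; simp
    have hpos : (pvPos L).get? (String.singleton c) = some (k : Int) := by
      rw [pvPos_get, hk]; simp
    rw [pvGoA, hscan]
    simp only [List.foldl_cons]
    have hstep : pvStepB (pvPos L) M c = M.set k (M.getD k 0 + 1) := by
      rw [pvStepB, hpos]; simp
    rw [hstep, ih L _ (fun c' hc' => hmem c' (List.mem_cons_of_mem _ hc'))]

-- ===== VERDICT (by name: the statement is the Claim_ definition above) =====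
theorem get_letters_and_multiplicity_spec : Claim_equal_get_letters_and_multiplicity := by
  intro word letters multiplicity _dom hpre
  unfold Spec_get_letters_and_multiplicity
  cases letters with
  | none =>
    simp only [get_letters_and_multiplicity, get_letters_and_multiplicity_alt]
    apply pvGoA_eq_fold
    intro c hc
    rw [PySem.List.mem_sorted, PySem.Set.mem_ofList]
    exact List.mem_map.mpr ⟨c, hc, rfl⟩
  | some L =>
    cases multiplicity with
    | none => exact absurd hpre (by simp [Pre_get_letters_and_multiplicity])
    | some M =>
      simp only [get_letters_and_multiplicity, get_letters_and_multiplicity_alt, Option.getD_some]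
      apply pvGoA_eq_fold
      intro c hc
      rw [Pre_get_letters_and_multiplicity, List.all_eq_true] at hpre
      have h := hpre c hc
      cases hidx : PySem.List.index? L (String.singleton c) with
      | none => rw [hidx] at h; simp at h
      | some i =>
        exact (PySem.List.index?_isSome_iff L (String.singleton c)).mp (by rw [hidx]; rfl)
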